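-- pv_equiv track=rewrite | github.com/tonghien22890/sam-lib | core/sequence_evaluator.py | _sample_cards_from_ranks
-- ===== SOURCE A (Python) =====
-- from typing import List, Dict, Any, Tuple, Set, Optional
--
-- def _sample_cards_from_ranks(card_ranks: List[int], rank_to_cards: Dict[int, List[int]]) -> List[int]:
--     temp_usage: Dict[int, int] = {}
--     taken: List[int] = []
--     for rank in card_ranks:
--         usage = temp_usage.get(rank, 0)
--         cards = rank_to_cards.get(rank, [])
--         if usage >= len(cards):
--             return []
--         taken.append(cards[usage])
--         temp_usage[rank] = usage + 1
--     return taken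
-- ===== SOURCE B (Python) =====
-- def _sample_cards_from_ranks(card_ranks, rank_to_cards):
--     counts = {}
--     for r in card_ranks:
--         counts[r] = counts.get(r, 0) + 1
--     if any(c > len(rank_to_cards.get(r, [])) for r, c in counts.items()):
--         return []
--     iters = {r: iter(rank_to_cards.get(r, [])) for r in counts}
--     return [next(iters[r]) for r in card_ranks]
-- ===== Notes on version B (the rewrite author's own statement) =====
-- stated objective: alternative
-- what changed: Replaces A's fused check-and-emit loop with usage-index bookkeeping by three phases: tally rank counts, validate all counts against available cards up front (so the overflow test disappears from the emit loop), then emit via one consumable iterator per rank.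
import Mathlib
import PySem

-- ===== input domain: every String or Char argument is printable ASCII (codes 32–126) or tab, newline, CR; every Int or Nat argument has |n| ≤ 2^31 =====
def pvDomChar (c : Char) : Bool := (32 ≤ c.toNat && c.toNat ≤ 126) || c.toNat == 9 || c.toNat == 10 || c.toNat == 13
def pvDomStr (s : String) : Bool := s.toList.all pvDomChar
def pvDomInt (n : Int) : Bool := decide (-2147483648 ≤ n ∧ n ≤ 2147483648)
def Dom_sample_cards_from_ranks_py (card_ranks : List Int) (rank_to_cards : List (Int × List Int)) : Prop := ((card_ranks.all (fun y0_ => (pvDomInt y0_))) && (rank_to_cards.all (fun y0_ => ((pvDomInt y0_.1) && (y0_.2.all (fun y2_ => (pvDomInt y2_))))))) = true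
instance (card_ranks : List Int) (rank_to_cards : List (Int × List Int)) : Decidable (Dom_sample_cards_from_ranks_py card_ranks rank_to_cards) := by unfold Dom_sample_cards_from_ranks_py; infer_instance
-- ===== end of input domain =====

-- B replaces A's fused check-and-emit loop (usage-index bookkeeping) by three phases — tally rank counts, validate all counts up front, then emit via one consumable per-rank iterator — as an alternative decomposition of the same O(n) task.

-- ===== PORT A =====
def pvALoop (r2c : PySem.Dict Int (List Int)) : List Int → PySem.Dict Int Int → List Int → List Int
  | [], _, taken => taken
  | r :: rest, usage, taken =>
    let u := usage.getD r 0
    let cards := r2c.getD r []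
    if (cards.length : Int) ≤ u then []
    else pvALoop r2c rest (usage.insert r (u + 1)) (taken ++ [(PySem.List.pyGet? cards u).getD 0])

def sample_cards_from_ranks_py (card_ranks : List Int) (rank_to_cards : List (Int × List Int)) : List Int :=
  pvALoop (PySem.Dict.mk rank_to_cards) card_ranks PySem.Dict.empty []

-- ===== PORT B =====
-- emit phase: one "iterator" (remaining-cards list) per rank, consumed left to right
def pvBEmit (iters : PySem.Dict Int (List Int)) : List Int → List Int
  | [] => []
  | r :: rest =>
    let l := iters.getD r []
    l.headD 0 :: pvBEmit (iters.insert r l.tail) rest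

def sample_cards_from_ranks_py_alt (card_ranks : List Int) (rank_to_cards : List (Int × List Int)) : List Int :=
  let d := PySem.Dict.mk rank_to_cards
  let counts := card_ranks.foldl (fun c r => c.insert r (c.getD r 0 + 1)) PySem.Dict.empty
  if counts.items.any (fun p => ((d.getD p.1 []).length : Int) < p.2) then []
  else
    let iters := counts.keys.foldl (fun it r => it.insert r (d.getD r [])) PySem.Dict.empty
    pvBEmit iters card_ranks

-- ===== PRECONDITION & SPEC =====
def Spec_sample_cards_from_ranks_py (card_ranks : List Int) (rank_to_cards : List (Int × List Int)) (out : List Int) : Prop := out = sample_cards_from_ranks_py_alt card_ranks rank_to_cards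
instance (card_ranks : List Int) (rank_to_cards : List (Int × List Int)) (out : List Int) : Decidable (Spec_sample_cards_from_ranks_py card_ranks rank_to_cards out) := by unfold Spec_sample_cards_from_ranks_py; infer_instance

-- ===== CLAIM (what is proved, stated in full; the proofs are below) =====
def Claim_equal_sample_cards_from_ranks_py : Prop := ∀ (card_ranks : List Int) (rank_to_cards : List (Int × List Int)), Dom_sample_cards_from_ranks_py card_ranks rank_to_cards → Spec_sample_cards_from_ranks_py card_ranks rank_to_cards (sample_cards_from_ranks_py card_ranks rank_to_cards)

-- ===== LEMMAS AND PROOFS =====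

-- B's emit phase needs: the "iterators" agree with (cards r).drop (usage r), and no rank overflows.
lemma pvLoop_agree (g : PySem.Dict Int (List Int)) (ranks : List Int) :
    ∀ (usage : PySem.Dict Int Int) (iters : PySem.Dict Int (List Int)) (taken : List Int),
    (∀ r, 0 ≤ usage.getD r 0) →
    (∀ r, usage.getD r 0 + (ranks.count r : Int) ≤ ((g.getD r []).length : Int)) →
    (∀ r, r ∈ ranks → iters.getD r [] = (g.getD r []).drop (usage.getD r 0).toNat) →
    pvALoop g ranks usage taken = taken ++ pvBEmit iters ranks := by
  induction ranks with
  | nil => intro usage iters taken _ _ _; simp [pvALoop, pvBEmit]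
  | cons r rest ih =>
    intro usage iters taken hnn hok hit
    have hcnt : ((r :: rest).count r : Int) = (rest.count r : Int) + 1 := by
      rw [List.count_cons_self]; push_cast; ring
    have hnnr := hnn r
    have hlt : usage.getD r 0 < (((g.getD r []).length : Nat) : Int) := by
      have := hok r
      have h0 : (0:Int) ≤ (rest.count r : Int) := Int.natCast_nonneg _
      omega
    have hltn : (usage.getD r 0).toNat < (g.getD r []).length := by omega
    have hcast : ((usage.getD r 0).toNat : Int) = usage.getD r 0 := Int.toNat_of_nonneg hnnr
    have hdrop : (g.getD r []).drop (usage.getD r 0).toNat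
        = (g.getD r [])[(usage.getD r 0).toNat] :: (g.getD r []).drop ((usage.getD r 0).toNat + 1) :=
      List.drop_eq_getElem_cons hltn
    have hiter := hit r (List.mem_cons_self)
    have hget : (PySem.List.pyGet? (g.getD r []) (usage.getD r 0)).getD 0
        = (g.getD r [])[(usage.getD r 0).toNat] := by
      rw [PySem.List.pyGet?_eq_some_getElem _ hnnr hlt]; rfl
    simp only [pvALoop, pvBEmit]
    rw [if_neg (by omega)]
    have hrec := ih (usage.insert r (usage.getD r 0 + 1)) (iters.insert r (iters.getD r []).tail)
        (taken ++ [(PySem.List.pyGet? (g.getD r []) (usage.getD r 0)).getD 0])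
        (by
          intro r'
          rw [PySem.Dict.getD_insert]
          split_ifs with h
          · have := hnn r; omega
          · exact hnn r')
        (by
          intro r'
          rw [PySem.Dict.getD_insert]
          split_ifs with h
          · rw [h]
            have := hok r
            rw [hcnt] at this
            omega
          · have := hok r'
            have hle : ((rest.count r' : Nat) : Int) ≤ ((r :: rest).count r' : Int) := by
              rw [List.count_cons]
              split <;> push_cast <;> omega
            omega)
        (by
          intro r' hr'
          rw [PySem.Dict.getD_insert, PySem.Dict.getD_insert]
          split_ifs with h
          · rw [h, hiter, hdrop]
            have h2 : (usage.getD r 0 + 1).toNat = (usage.getD r 0).toNat + 1 := by omega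
            simp [h2]
          · exact hit r' (List.mem_cons_of_mem _ hr'))
    rw [hrec, hget, hiter, hdrop]
    simp [List.getElem?_eq_getElem hltn]

lemma pvLoop_fail (g : PySem.Dict Int (List Int)) (ranks : List Int) :
    ∀ (usage : PySem.Dict Int Int) (taken : List Int),
    (∀ r, 0 ≤ usage.getD r 0) →
    (∀ r, usage.getD r 0 ≤ ((g.getD r []).length : Int)) →
    (∃ r, ((g.getD r []).length : Int) < usage.getD r 0 + (ranks.count r : Int)) →
    pvALoop g ranks usage taken = [] := by
  induction ranks with
  | nil =>
    rintro usage taken _ hub ⟨r, hr⟩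
    have := hub r
    simp at hr
    omega
  | cons r rest ih =>
    intro usage taken hnn hub hex
    simp only [pvALoop]
    split_ifs with h
    · rfl
    · rw [not_le] at h
      apply ih
      · intro r'
        rw [PySem.Dict.getD_insert]
        split_ifs with heq
        · subst heq; have := hnn r'; omega
        · exact hnn r'
      · intro r'
        rw [PySem.Dict.getD_insert]
        split_ifs with heq
        · subst heq; omega
        · exact hub r'
      · obtain ⟨r0, hr0⟩ := hex
        refine ⟨r0, ?_⟩
        rw [PySem.Dict.getD_insert]
        split_ifs with heq
        · rw [heq] at hr0 ⊢
          rw [List.count_cons_self] at hr0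
          push_cast at hr0 ⊢
          omega
        · have hne : r0 ≠ r := heq
          rw [List.count_cons] at hr0
          simp [Ne.symm hne] at hr0
          omega

-- the iterator-building fold: looking up any rank seen in l yields its full card list
lemma pvBuild_getD (f : Int → List Int) (l : List Int) :
    ∀ (d : PySem.Dict Int (List Int)) (r : Int),
    (l.foldl (fun it x => it.insert x (f x)) d).getD r [] = if r ∈ l then f r else d.getD r [] := by
  induction l with
  | nil => intro d r; simp
  | cons x l ih =>
    intro d r
    simp only [List.foldl_cons]
    rw [ih]
    by_cases hrl : r ∈ l
    · simp [hrl, List.mem_cons]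
    · rw [PySem.Dict.getD_insert]
      by_cases hrx : r = x
      · simp [hrx]
      · simp [hrx, hrl, List.mem_cons]

-- B's validation pass fires exactly when some rank is demanded more often than it has cards
lemma pvCond_iff (g : PySem.Dict Int (List Int)) (card_ranks : List Int) :
    ((PySem.Dict.counter card_ranks).items.any
      (fun p => decide (((g.getD p.1 []).length : Int) < p.2)) = true)
    ↔ ∃ r, ((g.getD r []).length : Int) < (card_ranks.count r : Int) := by
  rw [List.any_eq_true]
  constructor
  · rintro ⟨p, hp, hlt⟩
    rw [PySem.Dict.items_counter] at hp
    obtain ⟨k, _, rfl⟩ := List.mem_map.mp hp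
    simp only [decide_eq_true_eq] at hlt
    exact ⟨k, hlt⟩
  · rintro ⟨r, hr⟩
    have hpos : 0 < card_ranks.count r := by
      by_contra hc
      have : card_ranks.count r = 0 := by omega
      rw [this] at hr
      have : (0:Int) ≤ ((g.getD r []).length : Int) := Int.natCast_nonneg _
      push_cast at hr
      omega
    refine ⟨(r, (card_ranks.count r : Int)), ?_, by simpa using hr⟩
    rw [PySem.Dict.items_counter]
    exact List.mem_map.mpr ⟨r, (PySem.Set.mem_ofList _ _).mpr (List.count_pos_iff.mp hpos), rfl⟩

-- ===== VERDICT (by name: the statement is the Claim_ definition above) =====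
theorem sample_cards_from_ranks_py_spec : Claim_equal_sample_cards_from_ranks_py := by
  intro card_ranks rank_to_cards _
  unfold Spec_sample_cards_from_ranks_py sample_cards_from_ranks_py sample_cards_from_ranks_py_alt
  simp only []
  rw [PySem.Dict.foldl_insert_getD_add_one_eq_counter]
  by_cases hC : ∀ r, (card_ranks.count r : Int) ≤ (((PySem.Dict.mk rank_to_cards).getD r []).length : Int)
  · have hcond : ((PySem.Dict.counter card_ranks).items.any
        (fun p => decide ((((PySem.Dict.mk rank_to_cards).getD p.1 []).length : Int) < p.2))) = false := by
      rw [Bool.eq_false_iff]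
      intro hany
      obtain ⟨r, hr⟩ := (pvCond_iff _ _).mp hany
      have := hC r
      omega
    rw [hcond, if_neg (by simp)]
    rw [PySem.Dict.keys_counter]
    rw [pvLoop_agree (PySem.Dict.mk rank_to_cards) card_ranks PySem.Dict.empty
        ((PySem.Set.ofList card_ranks).foldl
          (fun it r => it.insert r ((PySem.Dict.mk rank_to_cards).getD r [])) PySem.Dict.empty) []
        (by intro r; simp)
        (by intro r; simpa using hC r)
        (by
          intro r hr
          rw [pvBuild_getD]
          simp [(PySem.Set.mem_ofList _ _).mpr hr])]
    simp
  · push Not at hC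
    obtain ⟨r, hr⟩ := hC
    have hcond : ((PySem.Dict.counter card_ranks).items.any
        (fun p => decide ((((PySem.Dict.mk rank_to_cards).getD p.1 []).length : Int) < p.2))) = true :=
      (pvCond_iff _ _).mpr ⟨r, hr⟩
    rw [hcond, if_pos rfl]
    exact pvLoop_fail (PySem.Dict.mk rank_to_cards) card_ranks PySem.Dict.empty []
      (by intro r; simp) (by intro r; simp) ⟨r, by simpa using hr⟩
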